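-- pv_equiv track=rewrite | github.com/hayama17/infra-jong | backend/game/tiles.py | can_form_term
-- ===== SOURCE A (Python) =====
-- VALID_TERMS = [
--     "SLI", "SLO", "SLA", "SRE",
--     "RTO", "RPO",
--     "HPA", "VPA", "CPA", "OPA",
--     "OCI", "CNI", "CSI", "CRI",
--     "POD", "IDP", "IAC", "CRD", "PVC", "SVC",
--     "DNS", "TLS", "VPN", "CDN",
--     "PKI", "SSO",
--     "IAM", "K8S", "SDK",
--     "APM",
--     "NOC",
-- ]
--
-- def can_form_term(tiles: list[str], target_term: str) -> bool:
--     """Check if the given tiles can form the target term (has all required chars)."""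
--     if target_term not in VALID_TERMS:
--         return False
--     term_chars = list(target_term)
--     available = list(tiles)
--     for ch in term_chars:
--         if ch in available:
--             available.remove(ch)
--         else:
--             return False
--     return True
-- ===== SOURCE B (Python) =====
-- VALID_TERMS = [
--     "SLI", "SLO", "SLA", "SRE",
--     "RTO", "RPO",
--     "HPA", "VPA", "CPA", "OPA",
--     "OCI", "CNI", "CSI", "CRI",
--     "POD", "IDP", "IAC", "CRD", "PVC", "SVC",
--     "DNS", "TLS", "VPN", "CDN",
--     "PKI", "SSO",
--     "IAM", "K8S", "SDK",
--     "APM",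
--     "NOC",
-- ]
--
-- def can_form_term(tiles: list[str], target_term: str) -> bool:
--     """Check if the given tiles can form the target term (has all required chars)."""
--     if target_term not in VALID_TERMS:
--         return False
--     counts = {}
--     for t in tiles:
--         counts[t] = counts.get(t, 0) + 1
--     needed = {}
--     for ch in target_term:
--         needed[ch] = needed.get(ch, 0) + 1
--     return all(counts.get(ch, 0) >= n for ch, n in needed.items())
-- ===== Notes on version B (the rewrite author's own statement) =====
-- stated objective: alternative
-- what changed: Replaces the copy-then-scan-and-remove loop over a mutable available list with two frequency tables (tile counts and needed char counts) built in one pass each, followed by a single multiset-subset comparison.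
import Mathlib
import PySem

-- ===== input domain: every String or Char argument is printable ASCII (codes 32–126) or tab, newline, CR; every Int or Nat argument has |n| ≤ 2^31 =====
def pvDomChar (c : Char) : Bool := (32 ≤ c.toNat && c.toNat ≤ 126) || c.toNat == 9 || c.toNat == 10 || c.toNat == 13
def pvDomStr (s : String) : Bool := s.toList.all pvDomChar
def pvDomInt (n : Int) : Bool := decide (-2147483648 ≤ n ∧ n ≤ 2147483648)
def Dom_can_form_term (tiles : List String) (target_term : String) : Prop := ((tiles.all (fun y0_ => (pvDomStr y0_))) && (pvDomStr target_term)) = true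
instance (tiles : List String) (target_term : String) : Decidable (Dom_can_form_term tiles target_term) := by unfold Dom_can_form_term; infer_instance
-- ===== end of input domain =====

-- B replaces A's scan-and-remove loop over a copied tile list by two one-pass frequency
-- tables and a single multiset-subset comparison (alternative decomposition, same cost class).

-- ===== PORT A =====
def VALID_TERMS : List String := [
  "SLI", "SLO", "SLA", "SRE",
  "RTO", "RPO",
  "HPA", "VPA", "CPA", "OPA",
  "OCI", "CNI", "CSI", "CRI",
  "POD", "IDP", "IAC", "CRD", "PVC", "SVC",
  "DNS", "TLS", "VPN", "CDN",
  "PKI", "SSO",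
  "IAM", "K8S", "SDK",
  "APM",
  "NOC"]

-- the for-loop over term_chars: 'if ch in available: available.remove(ch) else: return False'
def canFormLoop (term_chars : List String) (available : List String) : Bool :=
  match term_chars with
  | [] => true
  | ch :: rest => if available.contains ch then canFormLoop rest (available.erase ch) else false

def can_form_term (tiles : List String) (target_term : String) : Bool :=
  if ¬ (target_term ∈ VALID_TERMS) then false
  else
    -- term_chars = list(target_term); available = list(tiles)
    canFormLoop (target_term.toList.map (fun c => String.ofList [c])) tiles

-- ===== PORT B =====
def can_form_term_alt (tiles : List String) (target_term : String) : Bool :=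
  if ¬ (target_term ∈ VALID_TERMS) then false
  else
    let counts := tiles.foldl (fun d t => d.insert t (d.getD t 0 + 1)) (PySem.Dict.empty (κ := String) (ν := Int))
    let needed := (target_term.toList.map (fun c => String.ofList [c])).foldl
      (fun d ch => d.insert ch (d.getD ch 0 + 1)) (PySem.Dict.empty (κ := String) (ν := Int))
    needed.items.all (fun p => decide (p.2 ≤ counts.getD p.1 0))

-- ===== PRECONDITION & SPEC =====
def Spec_can_form_term (tiles : List String) (target_term : String) (out : Bool) : Prop := out = can_form_term_alt tiles target_term
instance (tiles : List String) (target_term : String) (out : Bool) : Decidable (Spec_can_form_term tiles target_term out) := by unfold Spec_can_form_term; infer_instance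

-- ===== CLAIM (what is proved, stated in full; the proofs are below) =====
def Claim_equal_can_form_term : Prop := ∀ (tiles : List String) (target_term : String), Dom_can_form_term tiles target_term → Spec_can_form_term tiles target_term (can_form_term tiles target_term)

-- ===== LEMMAS AND PROOFS =====

-- A's removal loop succeeds exactly on multiset containment of the term chars in the tiles.
theorem canFormLoop_eq_true_iff (cs av : List String) :
    canFormLoop cs av = true ↔ ∀ s, cs.count s ≤ av.count s := by
  induction cs generalizing av with
  | nil => simp [canFormLoop]
  | cons ch rest ih =>
    simp only [canFormLoop]
    by_cases h : av.contains ch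
    · have hmem : 1 ≤ av.count ch := List.one_le_count_iff.mpr (by simpa using h)
      simp only [h, if_pos, ih]
      have he : ∀ s, (av.erase ch).count s = av.count s - (if ch = s then 1 else 0) := by
        intro s; rw [List.count_erase]; simp
      have hc : ∀ s, (ch :: rest).count s = rest.count s + (if ch = s then 1 else 0) := by
        intro s; rw [List.count_cons]; simp
      constructor
      · intro hall s
        have hthis := hall s
        rw [he s] at hthis
        rw [hc s]
        by_cases hs : ch = s
        · subst hs; rw [if_pos rfl] at hthis; rw [if_pos rfl]; omega
        · rw [if_neg hs] at hthis; rw [if_neg hs]; omega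
      · intro hall s
        have hthis := hall s
        rw [hc s] at hthis
        rw [he s]
        by_cases hs : ch = s
        · subst hs; rw [if_pos rfl] at hthis; rw [if_pos rfl]; omega
        · rw [if_neg hs] at hthis; rw [if_neg hs]; omega
    · simp only [h, if_false, Bool.false_eq_true, false_iff]
      intro hall
      have h0 : av.count ch = 0 := by
        simp only [List.count_eq_zero]; simpa using h
      have := hall ch
      simp [h0] at this

-- B succeeds exactly on the same multiset containment.
theorem alt_body_eq_true_iff (tiles : List String) (tc : List String) :
    ((tc.foldl (fun d ch => d.insert ch (d.getD ch 0 + 1)) (PySem.Dict.empty (κ := String) (ν := Int))).items.all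
      (fun p => decide (p.2 ≤ (tiles.foldl (fun d t => d.insert t (d.getD t 0 + 1)) (PySem.Dict.empty (κ := String) (ν := Int))).getD p.1 0)) = true)
    ↔ ∀ s, tc.count s ≤ tiles.count s := by
  rw [PySem.Dict.foldl_insert_getD_add_one_eq_counter, PySem.Dict.foldl_insert_getD_add_one_eq_counter,
      PySem.Dict.items_counter]
  simp only [List.all_eq_true, List.mem_map, PySem.Dict.getD_counter]
  constructor
  · intro hall s
    by_cases hs : s ∈ tc
    · have := hall (s, (tc.count s : Int)) ⟨s, by simp [PySem.Set.mem_ofList, hs]⟩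
      simp only [decide_eq_true_eq] at this
      exact_mod_cast this
    · simp [List.count_eq_zero_of_not_mem hs]
  · rintro hall p ⟨k, hk, rfl⟩
    simp only [decide_eq_true_eq]
    exact_mod_cast hall k

theorem can_form_term_eq (tiles : List String) (target_term : String) :
    can_form_term tiles target_term = can_form_term_alt tiles target_term := by
  unfold can_form_term can_form_term_alt
  by_cases hv : target_term ∈ VALID_TERMS
  · simp only [hv, not_true_eq_false, ite_false]
    rw [Bool.eq_iff_iff, canFormLoop_eq_true_iff, alt_body_eq_true_iff]
  · simp [hv]

-- ===== VERDICT (by name: the statement is the Claim_ definition above) =====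
theorem can_form_term_spec : Claim_equal_can_form_term := by
  intro tiles target_term _
  exact can_form_term_eq tiles target_term
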